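-- pv_equiv track=rewrite | github.com/mjosaarinen/dme-py | invert_demo.py | gfmat_inv
-- ===== SOURCE A (Python) =====
-- def gfmat_gauss(m):
--     """Gaussian elimination in GF(2) -- in place."""
--     d = len(m)
--
--     for i in range(d):
--         p = False
--         for j in range(i, d):
--             p = (m[j] >> i) & 1
--             if p:
--                 if j != i:
--                     m[i],m[j] = m[j],m[i]
--                 break
--         if not p:
--             return False
--         for j in range(d):
--             if j != i and (m[j] >> i) & 1:
--                 m[j] ^= m[i]
--     return True
--
-- def gfmat_inv(m):
--     """Invert a square matrix in GF(2) -- returns the matrix."""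
--     d = len(m)
--     im = [ ((1 << (d + i)) | m[i]) for i in range(d) ]
--     if not gfmat_gauss(im):
--         return None
--     for i in range(d):
--         im[i] >>= d
--     return im
-- ===== SOURCE B (Python) =====
-- def gfmat_inv(m):
--     """Invert a square matrix in GF(2) -- returns the matrix.
--
--     Two-phase elimination: forward elimination to upper-triangular form,
--     then back-substitution, instead of one-pass Gauss-Jordan."""
--     d = len(m)
--     a = [((1 << (d + i)) | m[i]) for i in range(d)]
--     # phase 1: forward elimination
--     for i in range(d):
--         j = i
--         while j < d and not ((a[j] >> i) & 1):
--             j += 1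
--         if j == d:
--             return None
--         a[i], a[j] = a[j], a[i]
--         for k in range(i + 1, d):
--             if (a[k] >> i) & 1:
--                 a[k] ^= a[i]
--     # phase 2: back-substitution
--     for i in range(d - 1, -1, -1):
--         for k in range(i):
--             if (a[k] >> i) & 1:
--                 a[k] ^= a[i]
--     return [r >> d for r in a]
-- ===== Notes on version B (the rewrite author's own statement) =====
-- stated objective: alternative
-- what changed: Replaces one-pass Gauss-Jordan (clearing each pivot column from all other rows immediately) by a two-phase elimination: forward elimination to upper-triangular form with a while-loop pivot search and unconditional swap, followed by a separate back-substitution sweep; the output list is built by a comprehension instead of in-place shifts.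
import Mathlib
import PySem

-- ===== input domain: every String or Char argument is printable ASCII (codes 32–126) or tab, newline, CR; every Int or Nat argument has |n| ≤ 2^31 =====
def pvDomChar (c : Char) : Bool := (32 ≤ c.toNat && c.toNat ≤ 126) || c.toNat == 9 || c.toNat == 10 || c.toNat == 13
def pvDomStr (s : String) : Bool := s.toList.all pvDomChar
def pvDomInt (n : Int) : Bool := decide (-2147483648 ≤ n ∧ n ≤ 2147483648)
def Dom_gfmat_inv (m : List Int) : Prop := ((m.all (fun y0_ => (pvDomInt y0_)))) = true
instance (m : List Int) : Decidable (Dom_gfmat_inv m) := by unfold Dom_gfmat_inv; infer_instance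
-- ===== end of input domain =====

-- B replaces A's one-pass Gauss-Jordan by forward elimination to upper-triangular form
-- followed by a separate back-substitution sweep (alternative decomposition, same cost).


-- ===== PORT A =====
-- one column step of gfmat_gauss: pivot search with break, conditional swap, clear column i from all other rows
def gfA_step (d : Nat) (st : Bool × List Int) (i : Nat) : Bool × List Int :=
  if !st.1 then st else  -- early 'return False' already happened
  let mm := st.2
  match (List.range' i (d - i)).find? (fun j => PySem.Int.band (mm.getD j (0:Int) >>> i) 1 == 1) with
  | none => (false, mm)
  | some j =>
    let m1 := if j ≠ i then (mm.set i (mm.getD j (0:Int))).set j (mm.getD i (0:Int)) else mm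
    let m2 := (List.range d).foldl (fun (acc : List Int) j' =>
        if j' ≠ i ∧ PySem.Int.band (acc.getD j' (0:Int) >>> i) 1 = 1
        then acc.set j' (PySem.Int.bxor (acc.getD j' (0:Int)) (acc.getD i (0:Int))) else acc) m1
    (true, m2)

-- Gaussian elimination in GF(2); returns (success flag, final rows) — the Python mutates in place
def gfmat_gauss (m : List Int) : Bool × List Int :=
  let d := m.length
  (List.range d).foldl (gfA_step d) (true, m)

-- indices in the Python are provably in range and non-negative, so List.getD/List.set are exact
def gfmat_inv (m : List Int) : Option (List Int) :=
  let d := m.length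
  let im := (List.range d).map (fun i => PySem.Int.bor ((1:Int) <<< (d + i)) (m.getD i (0:Int)))
  let r := gfmat_gauss im
  if !r.1 then none else some (r.2.map (fun (x:Int) => x >>> d))

-- ===== PORT B =====
-- the 'while j < d and not ((a[j] >> i) & 1): j += 1' pivot scan
def gfB_while (a : List Int) (d i j : Nat) : Nat :=
  if h : j < d then
    if PySem.Int.band (a.getD j (0:Int) >>> i) 1 = 1 then j else gfB_while a d i (j + 1)
  else j
termination_by d - j

-- phase 1, one column: pivot scan, unconditional swap, clear column i from rows below i
def gfB_step1 (d : Nat) (st : Option (List Int)) (i : Nat) : Option (List Int) :=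
  match st with
  | none => none  -- early 'return None' already happened
  | some a =>
    let j := gfB_while a d i i
    if j = d then none else
    let a1 := (a.set i (a.getD j (0:Int))).set j (a.getD i (0:Int))
    let a2 := (List.range' (i + 1) (d - (i + 1))).foldl (fun (acc : List Int) k =>
        if PySem.Int.band (acc.getD k (0:Int) >>> i) 1 = 1
        then acc.set k (PySem.Int.bxor (acc.getD k (0:Int)) (acc.getD i (0:Int))) else acc) a1
    some a2

-- phase 2, one column: back-substitution, clear column i from rows above i
def gfB_step2 (st : List Int) (i : Nat) : List Int :=
  (List.range i).foldl (fun (acc : List Int) k =>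
      if PySem.Int.band (acc.getD k (0:Int) >>> i) 1 = 1
      then acc.set k (PySem.Int.bxor (acc.getD k (0:Int)) (acc.getD i (0:Int))) else acc) st

def gfmat_inv_alt (m : List Int) : Option (List Int) :=
  let d := m.length
  let a0 := (List.range d).map (fun i => PySem.Int.bor ((1:Int) <<< (d + i)) (m.getD i (0:Int)))
  match (List.range d).foldl (gfB_step1 d) (some a0) with
  | none => none
  | some a1 =>
    let a2 := ((List.range d).reverse).foldl gfB_step2 a1  -- range(d-1, -1, -1)
    some (a2.map (fun (r:Int) => r >>> d))

-- ===== PRECONDITION & SPEC =====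
def Spec_gfmat_inv (m : List Int) (out : Option (List Int)) : Prop := out = gfmat_inv_alt m
instance (m : List Int) (out : Option (List Int)) : Decidable (Spec_gfmat_inv m out) := by unfold Spec_gfmat_inv; infer_instance

-- ===== CLAIM (what is proved, stated in full; the proofs are below) =====
def Claim_equal_gfmat_inv : Prop := ∀ (m : List Int), Dom_gfmat_inv m → Spec_gfmat_inv m (gfmat_inv m)


-- ===== LEMMAS AND PROOFS =====

-- ---------- bit-level groundwork: Python int bits ----------

-- bit n of an arbitrary-precision two's-complement integer
def ibit (r : Int) (n : Nat) : Bool :=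
  if 0 ≤ r then r.toNat.testBit n else !((-r - 1).toNat.testBit n)

theorem ibit_of_nonneg {a : Int} (h : 0 ≤ a) (n : Nat) : ibit a n = a.toNat.testBit n := by
  unfold ibit; rw [if_pos h]

theorem ibit_of_neg {a : Int} (h : a < 0) (n : Nat) : ibit a n = !((-a - 1).toNat.testBit n) := by
  unfold ibit; rw [if_neg (by omega)]

theorem ibit_natCast (k n : Nat) : ibit (k : Int) n = k.testBit n := by
  rw [ibit_of_nonneg (by positivity)]; simp

theorem ibit_neg_sub_one (k n : Nat) : ibit (-(k : Int) - 1) n = !(k.testBit n) := by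
  rw [ibit_of_neg (by omega)]
  have : (-(-(k : Int) - 1) - 1) = (k : Int) := by ring
  rw [this]; simp

theorem ibit_bxor (a b : Int) (n : Nat) :
    ibit (PySem.Int.bxor a b) n = xor (ibit a n) (ibit b n) := by
  unfold PySem.Int.bxor
  rcases (by omega : 0 ≤ a ∨ a < 0) with ha | ha <;> rcases (by omega : 0 ≤ b ∨ b < 0) with hb | hb
  · rw [if_pos ha, if_pos hb, ibit_natCast, ibit_of_nonneg ha, ibit_of_nonneg hb, Nat.testBit_xor]
  · rw [if_pos ha, if_neg (by omega), ibit_neg_sub_one, Nat.testBit_xor,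
      ibit_of_nonneg ha, ibit_of_neg hb]
    cases a.toNat.testBit n <;> cases ((-b - 1).toNat.testBit n) <;> rfl
  · rw [if_neg (by omega), if_pos hb, ibit_neg_sub_one, Nat.testBit_xor,
      ibit_of_neg ha, ibit_of_nonneg hb]
    cases ((-a - 1).toNat.testBit n) <;> cases b.toNat.testBit n <;> rfl
  · rw [if_neg (by omega), if_neg (by omega), ibit_natCast, Nat.testBit_xor,
      ibit_of_neg ha, ibit_of_neg hb]
    cases ((-a - 1).toNat.testBit n) <;> cases ((-b - 1).toNat.testBit n) <;> rfl

theorem ibit_shiftRight (r : Int) (k n : Nat) : ibit (r >>> k) n = ibit r (n + k) := by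
  cases r with
  | ofNat v =>
    have h : (Int.ofNat v) >>> k = Int.ofNat (v >>> k) := rfl
    rw [h, Int.ofNat_eq_natCast, Int.ofNat_eq_natCast, ibit_natCast, ibit_natCast,
      Nat.testBit_shiftRight, Nat.add_comm]
  | negSucc v =>
    have h : (Int.negSucc v) >>> k = Int.negSucc (v >>> k) := rfl
    have e : ∀ w : Nat, Int.negSucc w = -(w : Int) - 1 := by
      intro w; rw [Int.negSucc_eq]; ring
    rw [h, e, e, ibit_neg_sub_one, ibit_neg_sub_one, Nat.testBit_shiftRight, Nat.add_comm]

theorem ibit_zero (n : Nat) : ibit 0 n = false := by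
  rw [ibit_of_nonneg le_rfl]; simp

theorem band_one_ibit (r : Int) : PySem.Int.band r 1 = if ibit r 0 then 1 else 0 := by
  unfold PySem.Int.band
  rcases (by omega : 0 ≤ r ∨ r < 0) with h | h
  · rw [if_pos h, if_pos (by norm_num : (0:Int) ≤ 1), ibit_of_nonneg h]
    have h1 : (1:Int).toNat = 1 := rfl
    rw [h1, Nat.and_one_is_mod, Nat.testBit_zero]
    rcases Nat.mod_two_eq_zero_or_one r.toNat with h2 | h2 <;> rw [h2] <;> simp
  · rw [if_neg (by omega), if_pos (by norm_num : (0:Int) ≤ 1), ibit_of_neg h]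
    have h1 : (1:Int).toNat = 1 := rfl
    rw [h1, Nat.testBit_zero]
    have h3 : 1 &&& (-r - 1).toNat = (-r - 1).toNat % 2 := by
      rw [Nat.and_comm, Nat.and_one_is_mod]
    rw [h3]
    rcases Nat.mod_two_eq_zero_or_one (-r - 1).toNat with h2 | h2 <;> rw [h2] <;> simp

-- the port's bit test '(x >> i) & 1' as a Prop / Bool
theorem bit_prop (x : Int) (i : Nat) :
    (PySem.Int.band (x >>> i) 1 = 1) ↔ ibit x i = true := by
  rw [band_one_ibit]
  have hsh : ibit (x >>> i) 0 = ibit x i := by rw [ibit_shiftRight, Nat.zero_add]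
  rw [hsh]
  cases ibit x i <;> simp

theorem bit_bool (x : Int) (i : Nat) :
    (PySem.Int.band (x >>> i) 1 == 1) = ibit x i := by
  cases h : ibit x i
  · simp only [beq_eq_false_iff_ne, ne_eq]
    intro hc
    rw [(bit_prop x i).mp hc] at h
    cases h
  · simp only [beq_iff_eq]
    exact (bit_prop x i).mpr h

theorem ibit_ext {a b : Int} (h : ∀ n, ibit a n = ibit b n) : a = b := by
  rcases (by omega : 0 ≤ a ∨ a < 0) with ha | ha <;> rcases (by omega : 0 ≤ b ∨ b < 0) with hb | hb
  · have : a.toNat = b.toNat := by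
      apply Nat.eq_of_testBit_eq
      intro n
      have hn := h n
      rwa [ibit_of_nonneg ha, ibit_of_nonneg hb] at hn
    omega
  · exfalso
    have hn := h (a.toNat + (-b - 1).toNat)
    rw [ibit_of_nonneg ha, ibit_of_neg hb] at hn
    rw [Nat.testBit_eq_false_of_lt (lt_of_le_of_lt (Nat.le_add_right _ _) Nat.lt_two_pow_self),
      Nat.testBit_eq_false_of_lt (lt_of_le_of_lt (Nat.le_add_left _ _) Nat.lt_two_pow_self)] at hn
    simp at hn
  · exfalso
    have hn := h (b.toNat + (-a - 1).toNat)
    rw [ibit_of_nonneg hb, ibit_of_neg ha] at hn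
    rw [Nat.testBit_eq_false_of_lt (lt_of_le_of_lt (Nat.le_add_right _ _) Nat.lt_two_pow_self),
      Nat.testBit_eq_false_of_lt (lt_of_le_of_lt (Nat.le_add_left _ _) Nat.lt_two_pow_self)] at hn
    simp at hn
  · have : (-a - 1).toNat = (-b - 1).toNat := by
      apply Nat.eq_of_testBit_eq
      intro n
      have hn := h n
      rw [ibit_of_neg ha, ibit_of_neg hb] at hn
      exact Bool.not_inj hn
    omega

-- ---------- GF(2) layer ----------

def zbit (r : Int) (n : Nat) : ZMod 2 := if ibit r n then 1 else 0

theorem zmod2_cases (x : ZMod 2) : x = 0 ∨ x = 1 := by revert x; decide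

theorem zbit_bxor (a b : Int) (n : Nat) :
    zbit (PySem.Int.bxor a b) n = zbit a n + zbit b n := by
  unfold zbit; rw [ibit_bxor]; cases ibit a n <;> cases ibit b n <;> decide

theorem ibit_eq_of_zbit {a b : Int} {na nb : Nat} (h : zbit a na = zbit b nb) :
    ibit a na = ibit b nb := by
  unfold zbit at h
  by_cases ha : ibit a na = true <;> by_cases hb : ibit b nb = true
  · rw [ha, hb]
  · exfalso; rw [if_pos ha, if_neg hb] at h; exact one_ne_zero h
  · exfalso; rw [if_neg ha, if_pos hb] at h; exact zero_ne_one h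
  · rw [Bool.not_eq_true] at ha hb; rw [ha, hb]

-- xor of a list of rows
def xlist (l : List Int) : Int := l.foldr PySem.Int.bxor 0

theorem zbit_xlist (l : List Int) (n : Nat) :
    zbit (xlist l) n = (l.map (fun r => zbit r n)).sum := by
  induction l with
  | nil => simp [xlist, zbit, ibit_zero]
  | cons a t ih => simp only [xlist, List.foldr_cons, List.map_cons, List.sum_cons] at *
                   rw [zbit_bxor, ih]

-- the augmented row i (same expression in both ports)
def aug (m : List Int) (i : Nat) : Int :=
  PySem.Int.bor ((1:Int) <<< (m.length + i)) (m.getD i (0:Int))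

def im0 (m : List Int) : List Int := (List.range m.length).map (fun i => aug m i)

-- xor-combination of initial rows with GF(2) coefficients
def rowOf (m : List Int) (c : Fin m.length → ZMod 2) : Int :=
  xlist ((List.finRange m.length).map (fun i => if c i = 1 then aug m (i:ℕ) else 0))

theorem zbit_rowOf (m : List Int) (c : Fin m.length → ZMod 2) (n : Nat) :
    zbit (rowOf m c) n = ∑ i : Fin m.length, c i * zbit (aug m (i:ℕ)) n := by
  unfold rowOf
  rw [zbit_xlist, List.map_map, Fin.sum_univ_def]
  congr 1
  apply List.map_congr_left
  intro i _
  show zbit (if c i = 1 then aug m (i:ℕ) else 0) n = c i * zbit (aug m (i:ℕ)) n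
  by_cases h : c i = 1
  · rw [if_pos h, h, one_mul]
  · rcases zmod2_cases (c i) with h0 | h0
    · rw [if_neg h, h0, zero_mul]
      show (if ibit 0 n then (1:ZMod 2) else 0) = 0
      rw [ibit_zero]; rfl
    · exact absurd h0 h

theorem rowOf_add (m : List Int) (c c' : Fin m.length → ZMod 2) :
    rowOf m (c + c') = PySem.Int.bxor (rowOf m c) (rowOf m c') := by
  apply ibit_ext; intro n
  apply ibit_eq_of_zbit
  rw [zbit_bxor, zbit_rowOf, zbit_rowOf, zbit_rowOf, ← Finset.sum_add_distrib]
  apply Finset.sum_congr rfl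
  intro i _
  rw [Pi.add_apply, add_mul]

-- low (left block) matrix of the augmented system
def Mlow (m : List Int) : Matrix (Fin m.length) (Fin m.length) (ZMod 2) :=
  fun i j => zbit (aug m (i:ℕ)) (j:ℕ)

-- state reachable from im0 by invertible GF(2) row operations
def Reach (m s : List Int) : Prop :=
  s.length = m.length ∧ ∃ C : Matrix (Fin m.length) (Fin m.length) (ZMod 2), C.det = 1 ∧
    ∀ k : Fin m.length, s.getD (k:ℕ) (0:Int) = rowOf m (C k)

-- ---------- list-surgery helpers ----------

theorem getD_set_self' {s : List Int} {k : Nat} (hk : k < s.length) (v : Int) :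
    (s.set k v).getD k (0:Int) = v := by
  rw [List.getD_eq_getElem?_getD, List.getElem?_set_self hk]; rfl

theorem getD_set_ne' {s : List Int} {k j : Nat} (h : k ≠ j) (v : Int) :
    (s.set k v).getD j (0:Int) = s.getD j (0:Int) := by
  rw [List.getD_eq_getElem?_getD, List.getElem?_set_ne h, ← List.getD_eq_getElem?_getD]

-- the Python swap 'a[i], a[j] = a[j], a[i]'
def swapL (s : List Int) (i j : Nat) : List Int :=
  (s.set i (s.getD j (0:Int))).set j (s.getD i (0:Int))

theorem length_swapL (s : List Int) (i j : Nat) : (swapL s i j).length = s.length := by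
  simp [swapL]

theorem getD_swapL (s : List Int) (i j k : Nat) (hi : i < s.length) (hj : j < s.length) :
    (swapL s i j).getD k (0:Int) =
      if k = j then s.getD i (0:Int) else if k = i then s.getD j (0:Int) else s.getD k (0:Int) := by
  unfold swapL
  by_cases hkj : k = j
  · subst hkj
    rw [getD_set_self' (by simpa using hj), if_pos rfl]
  · rw [getD_set_ne' (fun hc => hkj hc.symm), if_neg hkj]
    by_cases hki : k = i
    · subst hki
      rw [getD_set_self' hi, if_pos rfl]
    · rw [getD_set_ne' (fun hc => hki hc.symm), if_neg hki]

theorem reach_im0 (m : List Int) : Reach m (im0 m) := by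
  refine ⟨by simp [im0], 1, Matrix.det_one, ?_⟩
  intro k
  have hk : (k:ℕ) < m.length := k.isLt
  have h1 : (im0 m).getD (k:ℕ) (0:Int) = aug m (k:ℕ) := by
    rw [List.getD_eq_getElem _ _ (by simp [im0])]
    simp [im0]
  rw [h1]
  apply ibit_ext; intro n
  apply ibit_eq_of_zbit
  rw [zbit_rowOf]
  have hterm : ∀ i : Fin m.length,
      (1 : Matrix (Fin m.length) (Fin m.length) (ZMod 2)) k i * zbit (aug m (i:ℕ)) n =
      if k = i then zbit (aug m (i:ℕ)) n else 0 := by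
    intro i
    rw [Matrix.one_apply]
    by_cases h : k = i
    · rw [if_pos h, if_pos h, one_mul]
    · rw [if_neg h, if_neg h, zero_mul]
  rw [Finset.sum_congr rfl (fun i _ => hterm i), Finset.sum_ite_eq]
  simp

theorem reach_set_xor {m s : List Int} (h : Reach m s) {k i : Nat}
    (hk : k < s.length) (hi : i < s.length) (hne : k ≠ i) :
    Reach m (s.set k (PySem.Int.bxor (s.getD k (0:Int)) (s.getD i (0:Int)))) := by
  obtain ⟨hlen, C, hdet, hrow⟩ := h
  have hkm : k < m.length := hlen ▸ hk
  have him : i < m.length := hlen ▸ hi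
  refine ⟨by simp [hlen], C.updateRow ⟨k, hkm⟩ (C ⟨k, hkm⟩ + C ⟨i, him⟩), ?_, ?_⟩
  · rw [Matrix.det_updateRow_add_self C (by simp [Fin.ext_iff, hne] : (⟨k, hkm⟩ : Fin m.length) ≠ ⟨i, him⟩)]
    exact hdet
  · intro k'
    by_cases hk' : k' = (⟨k, hkm⟩ : Fin m.length)
    · subst hk'
      rw [Matrix.updateRow_self]
      show (s.set k _).getD k (0:Int) = _
      rw [getD_set_self' hk, rowOf_add]
      exact congrArg₂ PySem.Int.bxor (hrow ⟨k, hkm⟩) (hrow ⟨i, him⟩)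
    · have hne' : (k' : ℕ) ≠ k := fun hc => hk' (Fin.ext hc)
      rw [Matrix.updateRow_ne hk']
      show (s.set k _).getD (k' : ℕ) (0:Int) = _
      rw [getD_set_ne' (Ne.symm hne')]
      exact hrow k' 

theorem reach_swapL {m s : List Int} (h : Reach m s) {i j : Nat}
    (hi : i < s.length) (hj : j < s.length) : Reach m (swapL s i j) := by
  obtain ⟨hlen, C, hdet, hrow⟩ := h
  have him : i < m.length := hlen ▸ hi
  have hjm : j < m.length := hlen ▸ hj
  refine ⟨by simp [swapL, hlen], C.submatrix (Equiv.swap ⟨i, him⟩ ⟨j, hjm⟩) id, ?_, ?_⟩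
  · rw [Matrix.det_permute, hdet, mul_one]
    rcases Int.units_eq_one_or (Equiv.Perm.sign (Equiv.swap (⟨i, him⟩ : Fin m.length) ⟨j, hjm⟩)) with h1 | h1 <;>
      rw [h1] <;> decide
  · intro k
    have happ : (C.submatrix (Equiv.swap (⟨i, him⟩ : Fin m.length) ⟨j, hjm⟩) id) k =
        C ((Equiv.swap (⟨i, him⟩ : Fin m.length) ⟨j, hjm⟩) k) := rfl
    rw [happ, getD_swapL s i j (k:ℕ) hi hj]
    by_cases h1 : (k : ℕ) = j
    · rw [if_pos h1]
      have hk : k = (⟨j, hjm⟩ : Fin m.length) := Fin.ext h1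
      rw [hk, Equiv.swap_apply_right]
      exact hrow ⟨i, him⟩
    · by_cases h2 : (k:ℕ) = i
      · rw [if_neg h1, if_pos h2]
        have hk : k = (⟨i, him⟩ : Fin m.length) := Fin.ext h2
        rw [hk, Equiv.swap_apply_left]
        exact hrow ⟨j, hjm⟩
      · rw [if_neg h1, if_neg h2]
        rw [Equiv.swap_apply_of_ne_of_ne (fun hc => h2 (congrArg Fin.val hc))
          (fun hc => h1 (congrArg Fin.val hc))]
        exact hrow k

-- ---------- the elimination fold, generically ----------

theorem reach_elimFold (m : List Int) (i : Nat) (P : List Int → Nat → Prop)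
    [inst : ∀ a k, Decidable (P a k)] (L : List Nat)
    (hL : ∀ k ∈ L, k < m.length) (hi : i < m.length)
    (hsafe : ∀ k ∈ L, k = i → ∀ acc, ¬ P acc k) :
    ∀ s, Reach m s → Reach m (L.foldl (fun (acc : List Int) k =>
      if P acc k then acc.set k (PySem.Int.bxor (acc.getD k (0:Int)) (acc.getD i (0:Int))) else acc) s) := by
  revert hL hsafe
  induction L with
  | nil => intro _ _ s hs; exact hs
  | cons x L' ih =>
    intro hL hsafe s hs
    simp only [List.foldl_cons]
    have hstep : Reach m (if P s x then
        s.set x (PySem.Int.bxor (s.getD x (0:Int)) (s.getD i (0:Int))) else s) := by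
      by_cases hp : P s x
      · rw [if_pos hp]
        by_cases hxi : x = i
        · exact absurd hp (hsafe x (List.mem_cons_self) hxi s)
        · exact reach_set_xor hs (by rw [hs.1]; exact hL x List.mem_cons_self)
            (by rw [hs.1]; exact hi) hxi
      · rw [if_neg hp]; exact hs
    exact ih (fun k hk => hL k (List.mem_cons_of_mem _ hk))
      (fun k hk => hsafe k (List.mem_cons_of_mem _ hk)) _ hstep

theorem elimFold_getD (i : Nat) (P : List Int → Nat → Prop)
    [inst : ∀ a k, Decidable (P a k)] (L : List Nat) (hnd : L.Nodup) :
    ∀ (s : List Int), (∀ k ∈ L, k < s.length) → i < s.length →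
    (∀ acc k, k ∈ L → (P acc k ↔ (k ≠ i ∧ ibit (acc.getD k (0:Int)) i = true))) →
    (L.foldl (fun (acc : List Int) k =>
      if P acc k then acc.set k (PySem.Int.bxor (acc.getD k (0:Int)) (acc.getD i (0:Int))) else acc) s).length = s.length ∧
    ∀ k, (L.foldl (fun (acc : List Int) k =>
      if P acc k then acc.set k (PySem.Int.bxor (acc.getD k (0:Int)) (acc.getD i (0:Int))) else acc) s).getD k (0:Int) =
      if k ∈ L ∧ k ≠ i ∧ ibit (s.getD k (0:Int)) i = true
      then PySem.Int.bxor (s.getD k (0:Int)) (s.getD i (0:Int)) else s.getD k (0:Int) := by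
  revert hnd
  induction L with
  | nil =>
    intro _ s _ _ _
    exact ⟨rfl, fun k => by rw [List.foldl_nil, if_neg (by simp)]⟩
  | cons x L' ih =>
    intro hnd s hLb hi hP
    have hx : x < s.length := hLb x List.mem_cons_self
    have hxnot : x ∉ L' := (List.nodup_cons.mp hnd).1
    have hnd' : L'.Nodup := (List.nodup_cons.mp hnd).2
    simp only [List.foldl_cons]
    by_cases hp : P s x
    · have hbit := (hP s x List.mem_cons_self).mp hp
      have hlen' : (s.set x (PySem.Int.bxor (s.getD x (0:Int)) (s.getD i (0:Int)))).length = s.length := by simp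
      have ihres := ih hnd' (s.set x (PySem.Int.bxor (s.getD x (0:Int)) (s.getD i (0:Int))))
        (fun k hk => by rw [hlen']; exact hLb k (List.mem_cons_of_mem _ hk))
        (by rw [hlen']; exact hi)
        (fun acc k hk => hP acc k (List.mem_cons_of_mem _ hk))
      rw [if_pos hp]
      refine ⟨by rw [ihres.1, hlen'], ?_⟩
      intro k
      rw [ihres.2 k]
      have hgi : (s.set x (PySem.Int.bxor (s.getD x (0:Int)) (s.getD i (0:Int)))).getD i (0:Int)
          = s.getD i (0:Int) := getD_set_ne' hbit.1 _
      by_cases hkx : k = x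
      · subst hkx
        rw [if_neg (fun hc => hxnot hc.1)]
        rw [getD_set_self' hx]
        rw [if_pos ⟨List.mem_cons_self, hbit⟩]
      · have hgk : (s.set x (PySem.Int.bxor (s.getD x (0:Int)) (s.getD i (0:Int)))).getD k (0:Int)
            = s.getD k (0:Int) := getD_set_ne' (fun hc => hkx hc.symm) _
        rw [hgk, hgi]
        simp [List.mem_cons, hkx]
    · have hnb : ¬(x ≠ i ∧ ibit (s.getD x (0:Int)) i = true) :=
        fun hc => hp ((hP s x List.mem_cons_self).mpr hc)
      rw [if_neg hp]
      have ihres := ih hnd' s (fun k hk => hLb k (List.mem_cons_of_mem _ hk)) hi (fun acc k hk => hP acc k (List.mem_cons_of_mem _ hk))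
      refine ⟨ihres.1, ?_⟩
      intro k
      rw [ihres.2 k]
      by_cases hkx : k = x
      · subst hkx
        rw [if_neg (fun hc => hxnot hc.1), if_neg (fun hc => hnb hc.2)]
      · simp [List.mem_cons, hkx]

-- ---------- singularity from a failed pivot search ----------

theorem sum_fin_truncate {d : Nat} (t : Nat) (ht : t ≤ d) (f : Fin d → ZMod 2)
    (hf : ∀ j : Fin d, t ≤ (j:ℕ) → f j = 0) :
    ∑ j, f j = ∑ j : Fin t, f ⟨(j:ℕ), by omega⟩ := by
  have h1 : ∑ j : Fin d, f j =
      ∑ j ∈ Finset.range d, (fun j => if h : j < d then f ⟨j, h⟩ else 0) j := by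
    rw [← Fin.sum_univ_eq_sum_range (fun j => if h : j < d then f ⟨j, h⟩ else 0) d]
    apply Finset.sum_congr rfl
    intro i _
    rw [dif_pos i.isLt]
  have h2 : (∑ j : Fin t, f ⟨(j:ℕ), by omega⟩) =
      ∑ j ∈ Finset.range t, (fun j => if h : j < d then f ⟨j, h⟩ else 0) j := by
    rw [← Fin.sum_univ_eq_sum_range (fun j => if h : j < d then f ⟨j, h⟩ else 0) t]
    apply Finset.sum_congr rfl
    intro i _
    rw [dif_pos (by omega : (i:ℕ) < d)]
  rw [h1, h2]
  symm
  apply Finset.sum_subset (by intro x hx; simp only [Finset.mem_range] at *; omega : Finset.range t ⊆ Finset.range d)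
  intro x hx hnx
  simp only [Finset.mem_range] at hx hnx
  rw [dif_pos hx]
  exact hf ⟨x, hx⟩ (by show t ≤ x; omega)

theorem underdet {d : Nat} (i : Nat) (hid : i < d) (N : Matrix (Fin d) (Fin d) (ZMod 2))
    (h0 : ∀ k : Fin d, i ≤ (k:ℕ) → ∀ j : Fin d, (j:ℕ) ≤ i → N k j = 0) : N.det = 0 := by
  have hdetQ : (Matrix.det (fun (k j : Fin (i+1)) =>
      if hk : (k:ℕ) < i then N ⟨(k:ℕ), by omega⟩ ⟨(j:ℕ), by omega⟩ else 0)) = 0 :=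
    Matrix.det_eq_zero_of_row_eq_zero ⟨i, by omega⟩ (fun j => by simp)
  obtain ⟨v', hv'ne, hv'⟩ := Matrix.exists_mulVec_eq_zero_iff.mpr hdetQ
  have hvz : ∀ j : Fin d, i + 1 ≤ (j:ℕ) →
      (fun (j : Fin d) => if hj : (j:ℕ) < i + 1 then v' ⟨(j:ℕ), hj⟩ else 0) j = 0 := by
    intro j hj
    show (if hj2 : (j:ℕ) < i + 1 then v' ⟨(j:ℕ), hj2⟩ else 0) = 0
    rw [dif_neg (by omega)]
  have hmv : N.mulVec (fun (j : Fin d) => if hj : (j:ℕ) < i + 1 then v' ⟨(j:ℕ), hj⟩ else 0) = 0 := by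
    funext k
    show (∑ j, N k j * (fun (j : Fin d) => if hj : (j:ℕ) < i + 1 then v' ⟨(j:ℕ), hj⟩ else 0) j) = 0
    rw [sum_fin_truncate (i+1) (by omega) _ (fun j hj => by rw [hvz j hj, mul_zero])]
    by_cases hk : (k:ℕ) < i
    · have hQk : (Matrix.mulVec (fun (k j : Fin (i+1)) =>
          if hk : (k:ℕ) < i then N ⟨(k:ℕ), by omega⟩ ⟨(j:ℕ), by omega⟩ else 0) v') ⟨(k:ℕ), by omega⟩ = 0 :=
        congrFun hv' _
      calc (∑ j : Fin (i+1), N k ⟨(j:ℕ), by omega⟩ *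
              (fun (j : Fin d) => if hj : (j:ℕ) < i + 1 then v' ⟨(j:ℕ), hj⟩ else 0) ⟨(j:ℕ), by omega⟩)
          = ∑ j : Fin (i+1), (fun (k j : Fin (i+1)) =>
              if hk : (k:ℕ) < i then N ⟨(k:ℕ), by omega⟩ ⟨(j:ℕ), by omega⟩ else 0) ⟨(k:ℕ), by omega⟩ j * v' j := by
            apply Finset.sum_congr rfl
            intro j _
            have e1 : (fun (j : Fin d) => if hj : (j:ℕ) < i + 1 then v' ⟨(j:ℕ), hj⟩ else 0)
                (⟨(j:ℕ), by omega⟩ : Fin d) = v' j := by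
              show (if hj2 : (j:ℕ) < i + 1 then v' ⟨(j:ℕ), hj2⟩ else 0) = v' j
              rw [dif_pos (by omega : (j:ℕ) < i + 1)]
            have e2 : (fun (k j : Fin (i+1)) =>
                if hk : (k:ℕ) < i then N ⟨(k:ℕ), by omega⟩ ⟨(j:ℕ), by omega⟩ else 0) ⟨(k:ℕ), by omega⟩ j
                = N k ⟨(j:ℕ), by omega⟩ := by
              show (if hk' : ((⟨(k:ℕ), by omega⟩ : Fin (i+1)) : ℕ) < i then _ else 0) = _
              rw [dif_pos (by omega : ((⟨(k:ℕ), by omega⟩ : Fin (i+1)) : ℕ) < i)]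
            rw [e1, e2]
          _ = 0 := hQk
    · apply Finset.sum_eq_zero
      intro j _
      rw [h0 k (by omega) ⟨(j:ℕ), by omega⟩ (by show (j:ℕ) ≤ i; omega), zero_mul]
  have hvne : (fun (j : Fin d) => if hj : (j:ℕ) < i + 1 then v' ⟨(j:ℕ), hj⟩ else 0) ≠ 0 := by
    intro hc
    apply hv'ne
    funext j
    have hj := congrFun hc ⟨(j:ℕ), by omega⟩
    have h2 : (if hj2 : (j:ℕ) < i + 1 then v' ⟨(j:ℕ), hj2⟩ else 0) = (0 : ZMod 2) := hj
    rw [dif_pos (by omega : (j:ℕ) < i + 1)] at h2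
    have h3 : v' ⟨(j:ℕ), by omega⟩ = v' j := congrArg v' (Fin.ext rfl)
    rw [h3] at h2
    exact h2
  exact Matrix.exists_mulVec_eq_zero_iff.mp ⟨_, hvne, hmv⟩

theorem mul_Mlow_apply {m s : List Int}
    (C : Matrix (Fin m.length) (Fin m.length) (ZMod 2))
    (hrow : ∀ k : Fin m.length, s.getD (k:ℕ) (0:Int) = rowOf m (C k))
    (k j : Fin m.length) :
    (C * Mlow m) k j = zbit (s.getD (k:ℕ) (0:Int)) (j:ℕ) := by
  rw [Matrix.mul_apply, hrow k]
  rw [zbit_rowOf m (C k) (j:ℕ)]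
  apply Finset.sum_congr rfl
  intro l _
  rfl

theorem singular (m s : List Int) (h : Reach m s) (i : Nat) (hid : i < m.length)
    (hz : ∀ k, i ≤ k → k < m.length → ∀ j, j ≤ i → ibit (s.getD k (0:Int)) j = false) :
    (Mlow m).det = 0 := by
  obtain ⟨hlen, C, hdet, hrow⟩ := h
  have hdetN : (C * Mlow m).det = (Mlow m).det := by rw [Matrix.det_mul, hdet, one_mul]
  rw [← hdetN]
  apply underdet i hid
  intro k hk j hj
  rw [mul_Mlow_apply C hrow k j]
  unfold zbit
  rw [hz (k:ℕ) hk k.isLt (j:ℕ) hj]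
  rfl

-- ---------- invariants ----------

-- Gauss-Jordan invariant: columns below t of the low block form the identity
def LowInv (m s : List Int) (t : Nat) : Prop :=
  ∀ k, k < m.length → ∀ j, j < t → ibit (s.getD k (0:Int)) j = decide (k = j)

-- upper-triangular invariant of B's phase 1
def UT (m s : List Int) (t : Nat) : Prop :=
  ∀ j, j < t → ibit (s.getD j (0:Int)) j = true ∧
    ∀ k, j < k → k < m.length → ibit (s.getD k (0:Int)) j = false

theorem lowinv_mul_eq_one {m s : List Int} (_hlen : s.length = m.length)
    (C : Matrix (Fin m.length) (Fin m.length) (ZMod 2))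
    (hrow : ∀ k : Fin m.length, s.getD (k:ℕ) (0:Int) = rowOf m (C k))
    (hlow : LowInv m s m.length) : C * Mlow m = 1 := by
  ext k j
  rw [mul_Mlow_apply C hrow k j, Matrix.one_apply]
  unfold zbit
  rw [hlow (k:ℕ) k.isLt (j:ℕ) j.isLt]
  by_cases hkj : k = j
  · rw [if_pos hkj]
    have hv : ((k:ℕ) = (j:ℕ)) := congrArg Fin.val hkj
    simp [hv]
  · rw [if_neg hkj]
    have hv : ¬((k:ℕ) = (j:ℕ)) := fun hc => hkj (Fin.ext hc)
    simp [hv]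

-- ---------- the two algorithms ----------

theorem gfmat_inv_eq (m : List Int) :
    gfmat_inv m =
      (if !((List.range m.length).foldl (gfA_step m.length) (true, im0 m)).1 then none
       else some ((((List.range m.length).foldl (gfA_step m.length) (true, im0 m)).2).map
         (fun (x:Int) => x >>> m.length))) := by
  simp only [gfmat_inv, gfmat_gauss, im0, aug, List.length_map, List.length_range]

theorem gfmat_inv_alt_eq (m : List Int) :
    gfmat_inv_alt m =
      (match (List.range m.length).foldl (gfB_step1 m.length) (some (im0 m)) with
       | none => none
       | some a1 => some ((((List.range m.length).reverse).foldl gfB_step2 a1).map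
            (fun (r:Int) => r >>> m.length))) := by
  simp only [gfmat_inv_alt, im0, aug]

theorem gfA_step_false (d : Nat) (s : List Int) (i : Nat) :
    gfA_step d (false, s) i = (false, s) := rfl

theorem gfA_step_true (d : Nat) (s : List Int) (i : Nat) :
    gfA_step d (true, s) i =
      (match (List.range' i (d - i)).find?
          (fun j => PySem.Int.band (s.getD j (0:Int) >>> i) 1 == 1) with
       | none => (false, s)
       | some j => (true, (List.range d).foldl (fun (acc : List Int) j' =>
           if j' ≠ i ∧ PySem.Int.band (acc.getD j' (0:Int) >>> i) 1 = 1
           then acc.set j' (PySem.Int.bxor (acc.getD j' (0:Int)) (acc.getD i (0:Int))) else acc)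
           (if j ≠ i then swapL s i j else s))) := rfl

theorem A_loop (m : List Int) : ∀ t, t ≤ m.length →
    (∃ s, (List.range t).foldl (gfA_step m.length) (true, im0 m) = (true, s) ∧
      Reach m s ∧ LowInv m s t)
    ∨ (((List.range t).foldl (gfA_step m.length) (true, im0 m)).1 = false ∧ (Mlow m).det = 0) := by
  intro t
  induction t with
  | zero =>
    intro _
    exact Or.inl ⟨im0 m, by simp, reach_im0 m, fun k _ j hj => absurd hj (by omega)⟩
  | succ t ih =>
    intro ht1
    have htlt : t < m.length := by omega
    have hfoldstep : (List.range (t+1)).foldl (gfA_step m.length) (true, im0 m)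
        = gfA_step m.length ((List.range t).foldl (gfA_step m.length) (true, im0 m)) t := by
      rw [List.range_succ, List.foldl_append, List.foldl_cons, List.foldl_nil]
    rcases ih (by omega) with ⟨s, hfold, hreach, hlow⟩ | ⟨hflag, hdet⟩
    · have hlen : s.length = m.length := hreach.1
      rcases hfind : (List.range' t (m.length - t)).find?
          (fun j => PySem.Int.band (s.getD j (0:Int) >>> t) 1 == 1) with _ | j
      · right
        have hstep2 : gfA_step m.length (true, s) t = (false, s) := by
          rw [gfA_step_true, hfind]
        constructor
        · rw [hfoldstep, hfold, hstep2]
        · apply singular m s hreach t htlt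
          intro k hk1 hk2 j2 hj2
          by_cases hjt : j2 = t
          · rw [hjt]
            have hnone := List.find?_eq_none.mp hfind k (by rw [List.mem_range'_1]; omega)
            cases hbit : ibit (s.getD k (0:Int)) t
            · rfl
            · exact absurd (by rw [bit_bool, hbit]) hnone
          · have hd := hlow k hk2 j2 (by omega)
            rw [hd]
            simp [show ¬ (k = j2) by omega]
      · left
        have hjmem := List.mem_of_find?_eq_some hfind
        rw [List.mem_range'_1] at hjmem
        have hjlt : j < m.length := by omega
        have hjbit : ibit (s.getD j (0:Int)) t = true := by
          have hp := List.find?_some hfind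
          rwa [bit_bool] at hp
        have hdesc : ∀ k, ((if j ≠ t then swapL s t j else s).getD k (0:Int)) =
            (if k = j then s.getD t (0:Int) else if k = t then s.getD j (0:Int)
             else s.getD k (0:Int)) := by
          intro k
          by_cases hjt : j = t
          · subst hjt
            rw [if_neg (by simp)]
            by_cases hkj : k = j
            · subst hkj; rw [if_pos rfl]
            · rw [if_neg hkj, if_neg hkj]
          · rw [if_pos hjt, getD_swapL s t j k (by omega) (by omega)]
        have hlen1 : (if j ≠ t then swapL s t j else s).length = m.length := by
          by_cases hjt : j ≠ t
          · rw [if_pos hjt, length_swapL, hlen]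
          · rw [if_neg hjt, hlen]
        have hreach1 : Reach m (if j ≠ t then swapL s t j else s) := by
          by_cases hjt : j ≠ t
          · rw [if_pos hjt]; exact reach_swapL hreach (by omega) (by omega)
          · rw [if_neg hjt]; exact hreach
        have hlow1 : ∀ k, k < m.length → ∀ j', j' < t →
            ibit ((if j ≠ t then swapL s t j else s).getD k (0:Int)) j' = decide (k = j') := by
          intro k hk j' hj'
          rw [hdesc k]
          by_cases h1 : k = j
          · rw [if_pos h1, hlow t htlt j' hj']
            simp [show ¬ t = j' by omega, show ¬ k = j' by omega]
          · rw [if_neg h1]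
            by_cases h2 : k = t
            · rw [if_pos h2, hlow j hjlt j' hj']
              simp [show ¬ j = j' by omega, show ¬ k = j' by omega]
            · rw [if_neg h2, hlow k hk j' hj']
        have hdiag1 : ibit ((if j ≠ t then swapL s t j else s).getD t (0:Int)) t = true := by
          rw [hdesc t]
          by_cases h1 : t = j
          · rw [if_pos h1, show s.getD t (0:Int) = s.getD j (0:Int) from by rw [h1]]
            exact hjbit
          · rw [if_neg h1, if_pos rfl]; exact hjbit
        have hP : ∀ (acc : List Int) (k : Nat), k ∈ List.range m.length →
            ((k ≠ t ∧ PySem.Int.band (acc.getD k (0:Int) >>> t) 1 = 1) ↔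
             (k ≠ t ∧ ibit (acc.getD k (0:Int)) t = true)) := by
          intro acc k _
          exact ⟨fun h => ⟨h.1, (bit_prop _ _).mp h.2⟩, fun h => ⟨h.1, (bit_prop _ _).mpr h.2⟩⟩
        have helim := elimFold_getD t
          (fun (acc : List Int) (k : Nat) => k ≠ t ∧ PySem.Int.band (acc.getD k (0:Int) >>> t) 1 = 1)
          (List.range m.length) List.nodup_range (if j ≠ t then swapL s t j else s)
          (fun k hk => by rw [hlen1]; exact List.mem_range.mp hk)
          (by rw [hlen1]; exact htlt) hP
        have hreach2 := reach_elimFold m t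
          (fun (acc : List Int) (k : Nat) => k ≠ t ∧ PySem.Int.band (acc.getD k (0:Int) >>> t) 1 = 1)
          (List.range m.length)
          (fun k hk => List.mem_range.mp hk) htlt
          (fun k _ hkt acc hp => hp.1 hkt)
          (if j ≠ t then swapL s t j else s) hreach1
        refine ⟨_, ?_, hreach2, ?_⟩
        · rw [hfoldstep, hfold, gfA_step_true, hfind]
        · intro k hk j' hj'
          rw [helim.2 k]
          by_cases hcond : k ∈ List.range m.length ∧ k ≠ t ∧
              ibit ((if j ≠ t then swapL s t j else s).getD k (0:Int)) t = true
          · rw [if_pos hcond, ibit_bxor]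
            by_cases hj't : j' = t
            · rw [hj't]
              rw [hcond.2.2, hdiag1]
              simp [hcond.2.1]
            · have hj'lt : j' < t := by omega
              rw [hlow1 k hk j' hj'lt, hlow1 t htlt j' hj'lt]
              simp [show ¬ t = j' by omega]
          · rw [if_neg hcond]
            by_cases hj't : j' = t
            · rw [hj't]
              by_cases hkt : k = t
              · rw [hkt, hdiag1]; simp
              · have hbf : ibit ((if j ≠ t then swapL s t j else s).getD k (0:Int)) t = false := by
                  cases hbb : ibit ((if j ≠ t then swapL s t j else s).getD k (0:Int)) t
                  · rfl
                  · exact absurd ⟨List.mem_range.mpr hk, hkt, hbb⟩ hcond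
                rw [hbf]
                simp [hkt]
            · exact hlow1 k hk j' (by omega)
    · right
      constructor
      · rw [hfoldstep]
        have hsplit : (List.range t).foldl (gfA_step m.length) (true, im0 m)
            = (false, ((List.range t).foldl (gfA_step m.length) (true, im0 m)).2) := by
          rw [← hflag]
        rw [hsplit, gfA_step_false]
      · exact hdet

theorem gfB_while_spec (a : List Int) (d i : Nat) : ∀ j, j ≤ d →
    (j ≤ gfB_while a d i j) ∧
    ((gfB_while a d i j = d ∧ ∀ k, j ≤ k → k < d → ibit (a.getD k (0:Int)) i = false) ∨
     (gfB_while a d i j < d ∧ ibit (a.getD (gfB_while a d i j) (0:Int)) i = true)) := by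
  have main : ∀ n j, d - j ≤ n → j ≤ d →
      (j ≤ gfB_while a d i j) ∧
      ((gfB_while a d i j = d ∧ ∀ k, j ≤ k → k < d → ibit (a.getD k (0:Int)) i = false) ∨
       (gfB_while a d i j < d ∧ ibit (a.getD (gfB_while a d i j) (0:Int)) i = true)) := by
    intro n
    induction n with
    | zero =>
      intro j hn hjd
      have hjd' : j = d := by omega
      rw [gfB_while, dif_neg (by omega)]
      exact ⟨le_rfl, Or.inl ⟨hjd', fun k hk1 hk2 => absurd hk2 (by omega)⟩⟩
    | succ n ihn =>
      intro j hn hjd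
      rw [gfB_while]
      by_cases h : j < d
      · rw [dif_pos h]
        by_cases hb : PySem.Int.band (a.getD j (0:Int) >>> i) 1 = 1
        · rw [if_pos hb]
          exact ⟨le_rfl, Or.inr ⟨h, (bit_prop _ _).mp hb⟩⟩
        · rw [if_neg hb]
          have ihres := ihn (j + 1) (by omega) (by omega)
          refine ⟨by omega, ?_⟩
          rcases ihres.2 with ⟨he, hall⟩ | hr
          · left
            refine ⟨he, ?_⟩
            intro k hk1 hk2
            by_cases hkj : k = j
            · subst hkj
              cases hbit : ibit (a.getD k (0:Int)) i
              · rfl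
              · exact absurd ((bit_prop _ _).mpr hbit) hb
            · exact hall k (by omega) hk2
          · right; exact hr
      · rw [dif_neg h]
        exact ⟨le_rfl, Or.inl ⟨by omega, fun k hk1 hk2 => absurd hk2 (by omega)⟩⟩
  intro j
  exact main (d - j) j le_rfl

theorem gfB_step1_some (d : Nat) (a : List Int) (i : Nat) :
    gfB_step1 d (some a) i =
      (if gfB_while a d i i = d then none else
       some ((List.range' (i+1) (d-(i+1))).foldl (fun (acc : List Int) k =>
          if PySem.Int.band (acc.getD k (0:Int) >>> i) 1 = 1
          then acc.set k (PySem.Int.bxor (acc.getD k (0:Int)) (acc.getD i (0:Int))) else acc)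
          (swapL a i (gfB_while a d i i)))) := rfl

theorem B1_loop (m : List Int) : ∀ t, t ≤ m.length →
    (∃ s, (List.range t).foldl (gfB_step1 m.length) (some (im0 m)) = some s ∧
      Reach m s ∧ UT m s t)
    ∨ ((List.range t).foldl (gfB_step1 m.length) (some (im0 m)) = none ∧ (Mlow m).det = 0) := by
  intro t
  induction t with
  | zero =>
    intro _
    exact Or.inl ⟨im0 m, by simp, reach_im0 m, fun j hj => absurd hj (by omega)⟩
  | succ t ih =>
    intro ht1
    have htlt : t < m.length := by omega
    have hfoldstep : (List.range (t+1)).foldl (gfB_step1 m.length) (some (im0 m))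
        = gfB_step1 m.length ((List.range t).foldl (gfB_step1 m.length) (some (im0 m))) t := by
      rw [List.range_succ, List.foldl_append, List.foldl_cons, List.foldl_nil]
    rcases ih (by omega) with ⟨s, hfold, hreach, hUT⟩ | ⟨hfold, hdet⟩
    · have hlen : s.length = m.length := hreach.1
      have hw := gfB_while_spec s m.length t t (by omega)
      rcases hw.2 with ⟨he, hall⟩ | ⟨hwlt, hwbit⟩
      · right
        constructor
        · rw [hfoldstep, hfold, gfB_step1_some, if_pos he]
        · apply singular m s hreach t htlt
          intro k hk1 hk2 j2 hj2
          by_cases hjt : j2 = t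
          · rw [hjt]; exact hall k hk1 hk2
          · exact (hUT j2 (by omega)).2 k (by omega) hk2
      · left
        have hwge : t ≤ gfB_while s m.length t t := hw.1
        have hdesc : ∀ k, (swapL s t (gfB_while s m.length t t)).getD k (0:Int) =
            (if k = gfB_while s m.length t t then s.getD t (0:Int)
             else if k = t then s.getD (gfB_while s m.length t t) (0:Int)
             else s.getD k (0:Int)) :=
          fun k => getD_swapL s t _ k (by omega) (by omega)
        have hreach1 : Reach m (swapL s t (gfB_while s m.length t t)) :=
          reach_swapL hreach (by omega) (by omega)
        have hUT1 : UT m (swapL s t (gfB_while s m.length t t)) t := by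
          intro j2 hj2
          constructor
          · rw [hdesc j2, if_neg (by omega), if_neg (by omega)]
            exact (hUT j2 hj2).1
          · intro k hk1 hk2
            rw [hdesc k]
            by_cases h1 : k = gfB_while s m.length t t
            · rw [if_pos h1]; exact (hUT j2 hj2).2 t (by omega) htlt
            · rw [if_neg h1]
              by_cases h2 : k = t
              · rw [if_pos h2]; exact (hUT j2 hj2).2 _ (by omega) hwlt
              · rw [if_neg h2]; exact (hUT j2 hj2).2 k hk1 hk2
        have hdiag1 : ibit ((swapL s t (gfB_while s m.length t t)).getD t (0:Int)) t = true := by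
          rw [hdesc t]
          by_cases h1 : t = gfB_while s m.length t t
          · rw [if_pos h1,
              show s.getD t (0:Int) = s.getD (gfB_while s m.length t t) (0:Int) from by rw [← h1]]
            exact hwbit
          · rw [if_neg h1, if_pos rfl]; exact hwbit
        have hmemL : ∀ k, k ∈ List.range' (t+1) (m.length - (t+1)) → t + 1 ≤ k ∧ k < m.length := by
          intro k hk; rw [List.mem_range'_1] at hk; omega
        have hP : ∀ (acc : List Int) (k : Nat), k ∈ List.range' (t+1) (m.length - (t+1)) →
            ((PySem.Int.band (acc.getD k (0:Int) >>> t) 1 = 1) ↔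
             (k ≠ t ∧ ibit (acc.getD k (0:Int)) t = true)) := by
          intro acc k hk
          constructor
          · intro h; exact ⟨by have := hmemL k hk; omega, (bit_prop _ _).mp h⟩
          · intro h; exact (bit_prop _ _).mpr h.2
        have hnd : (List.range' (t+1) (m.length - (t+1))).Nodup := List.nodup_range'
        have helim := elimFold_getD t
          (fun (acc : List Int) (k : Nat) => PySem.Int.band (acc.getD k (0:Int) >>> t) 1 = 1)
          (List.range' (t+1) (m.length - (t+1))) hnd (swapL s t (gfB_while s m.length t t))
          (fun k hk => by rw [length_swapL, hlen]; exact (hmemL k hk).2)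
          (by rw [length_swapL, hlen]; exact htlt) hP
        have hreach2 := reach_elimFold m t
          (fun (acc : List Int) (k : Nat) => PySem.Int.band (acc.getD k (0:Int) >>> t) 1 = 1)
          (List.range' (t+1) (m.length - (t+1)))
          (fun k hk => (hmemL k hk).2) htlt
          (fun k hk hkt acc => absurd hkt (by have := hmemL k hk; omega))
          (swapL s t (gfB_while s m.length t t)) hreach1
        refine ⟨_, ?_, hreach2, ?_⟩
        · rw [hfoldstep, hfold, gfB_step1_some, if_neg (by omega)]
        · intro j2 hj2
          by_cases hj2t : j2 = t
          · rw [hj2t]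
            constructor
            · rw [helim.2 t, if_neg (fun hc => by have := hmemL t hc.1; omega)]
              exact hdiag1
            · intro k hk1 hk2
              rw [helim.2 k]
              by_cases hcond : k ∈ List.range' (t+1) (m.length - (t+1)) ∧ k ≠ t ∧
                  ibit ((swapL s t (gfB_while s m.length t t)).getD k (0:Int)) t = true
              · rw [if_pos hcond, ibit_bxor, hcond.2.2, hdiag1]
                rfl
              · rw [if_neg hcond]
                cases hbb : ibit ((swapL s t (gfB_while s m.length t t)).getD k (0:Int)) t
                · rfl
                · exact absurd ⟨by rw [List.mem_range'_1]; omega, by omega, hbb⟩ hcond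
          · have hj2lt : j2 < t := by omega
            constructor
            · rw [helim.2 j2, if_neg (fun hc => by have := hmemL j2 hc.1; omega)]
              exact (hUT1 j2 hj2lt).1
            · intro k hk1 hk2
              rw [helim.2 k]
              by_cases hcond : k ∈ List.range' (t+1) (m.length - (t+1)) ∧ k ≠ t ∧
                  ibit ((swapL s t (gfB_while s m.length t t)).getD k (0:Int)) t = true
              · rw [if_pos hcond, ibit_bxor, (hUT1 j2 hj2lt).2 k hk1 hk2,
                  (hUT1 j2 hj2lt).2 t (by omega) htlt]
                rfl
              · rw [if_neg hcond]
                exact (hUT1 j2 hj2lt).2 k hk1 hk2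
    · right
      constructor
      · rw [hfoldstep, hfold]; rfl
      · exact hdet

theorem B2_loop (m sB : List Int) (hR : Reach m sB) (hUT : UT m sB m.length) :
    ∀ n t, t ≤ m.length → m.length - t = n →
    Reach m (((List.range' t (m.length - t)).reverse).foldl gfB_step2 sB) ∧
    (∀ j, t ≤ j → j < m.length → ∀ k, k < m.length →
      ibit ((((List.range' t (m.length - t)).reverse).foldl gfB_step2 sB).getD k (0:Int)) j = decide (k = j)) ∧
    UT m (((List.range' t (m.length - t)).reverse).foldl gfB_step2 sB) t := by
  intro n
  induction n with
  | zero =>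
    intro t ht hn
    have h0 : m.length - t = 0 := by omega
    rw [h0]
    simp only [List.range'_zero, List.reverse_nil, List.foldl_nil]
    refine ⟨hR, ?_, ?_⟩
    · intro j hj1 hj2 k hk
      exact absurd hj2 (by omega)
    · rw [show t = m.length from by omega]
      exact hUT
  | succ n ihn =>
    intro t ht hn
    have htlt : t < m.length := by omega
    have hsplit : List.range' t (m.length - t) = t :: List.range' (t+1) (m.length - (t+1)) := by
      rw [show m.length - t = (m.length - (t+1)) + 1 from by omega, List.range'_succ]
    have hfoldstep : ((List.range' t (m.length - t)).reverse).foldl gfB_step2 sB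
        = gfB_step2 (((List.range' (t+1) (m.length - (t+1))).reverse).foldl gfB_step2 sB) t := by
      rw [hsplit, List.reverse_cons, List.foldl_append, List.foldl_cons, List.foldl_nil]
    obtain ⟨hR', hid', hUT'⟩ := ihn (t+1) (by omega) (by omega)
    have hlen' : (((List.range' (t+1) (m.length - (t+1))).reverse).foldl gfB_step2 sB).length
        = m.length := hR'.1
    have hstep_eq : gfB_step2 (((List.range' (t+1) (m.length - (t+1))).reverse).foldl gfB_step2 sB) t
        = (List.range t).foldl (fun (acc : List Int) k =>
            if PySem.Int.band (acc.getD k (0:Int) >>> t) 1 = 1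
            then acc.set k (PySem.Int.bxor (acc.getD k (0:Int)) (acc.getD t (0:Int))) else acc)
          (((List.range' (t+1) (m.length - (t+1))).reverse).foldl gfB_step2 sB) := rfl
    have hP : ∀ (acc : List Int) (k : Nat), k ∈ List.range t →
        ((PySem.Int.band (acc.getD k (0:Int) >>> t) 1 = 1) ↔
         (k ≠ t ∧ ibit (acc.getD k (0:Int)) t = true)) := by
      intro acc k hk
      constructor
      · intro h; exact ⟨by have := List.mem_range.mp hk; omega, (bit_prop _ _).mp h⟩
      · intro h; exact (bit_prop _ _).mpr h.2
    have helim := elimFold_getD t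
      (fun (acc : List Int) (k : Nat) => PySem.Int.band (acc.getD k (0:Int) >>> t) 1 = 1)
      (List.range t) List.nodup_range
      (((List.range' (t+1) (m.length - (t+1))).reverse).foldl gfB_step2 sB)
      (fun k hk => by rw [hlen']; have := List.mem_range.mp hk; omega)
      (by rw [hlen']; exact htlt) hP
    have hreach2 := reach_elimFold m t
      (fun (acc : List Int) (k : Nat) => PySem.Int.band (acc.getD k (0:Int) >>> t) 1 = 1)
      (List.range t)
      (fun k hk => by have := List.mem_range.mp hk; omega) htlt
      (fun k hk hkt acc => absurd hkt (by have := List.mem_range.mp hk; omega))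
      (((List.range' (t+1) (m.length - (t+1))).reverse).foldl gfB_step2 sB) hR'
    have hdiagr' : ibit ((((List.range' (t+1) (m.length - (t+1))).reverse).foldl
        gfB_step2 sB).getD t (0:Int)) t = true := (hUT' t (by omega)).1
    rw [hfoldstep, hstep_eq]
    refine ⟨hreach2, ?_, ?_⟩
    · intro j hj1 hj2 k hk
      rw [helim.2 k]
      by_cases hjt : j = t
      · rw [hjt]
        by_cases hcond : k ∈ List.range t ∧ k ≠ t ∧
            ibit ((((List.range' (t+1) (m.length - (t+1))).reverse).foldl
              gfB_step2 sB).getD k (0:Int)) t = true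
        · rw [if_pos hcond, ibit_bxor, hcond.2.2, hdiagr']
          simp [show ¬ k = t from by have := List.mem_range.mp hcond.1; omega]
        · rw [if_neg hcond]
          by_cases hkt : k = t
          · rw [hkt, hdiagr']; simp
          · by_cases hklt : k < t
            · have hbf : ibit ((((List.range' (t+1) (m.length - (t+1))).reverse).foldl
                  gfB_step2 sB).getD k (0:Int)) t = false := by
                cases hbb : ibit ((((List.range' (t+1) (m.length - (t+1))).reverse).foldl
                    gfB_step2 sB).getD k (0:Int)) t
                · rfl
                · exact absurd ⟨List.mem_range.mpr hklt, hkt, hbb⟩ hcond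
              rw [hbf]; simp [hkt]
            · have hbf : ibit ((((List.range' (t+1) (m.length - (t+1))).reverse).foldl
                  gfB_step2 sB).getD k (0:Int)) t = false :=
                (hUT' t (by omega)).2 k (by omega) hk
              rw [hbf]; simp [hkt]
      · by_cases hcond : k ∈ List.range t ∧ k ≠ t ∧
            ibit ((((List.range' (t+1) (m.length - (t+1))).reverse).foldl
              gfB_step2 sB).getD k (0:Int)) t = true
        · rw [if_pos hcond, ibit_bxor, hid' j (by omega) hj2 k hk, hid' j (by omega) hj2 t htlt]
          simp [show ¬ t = j from by omega]
        · rw [if_neg hcond]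
          exact hid' j (by omega) hj2 k hk
    · intro j2 hj2
      constructor
      · rw [helim.2 j2]
        by_cases hcond : j2 ∈ List.range t ∧ j2 ≠ t ∧
            ibit ((((List.range' (t+1) (m.length - (t+1))).reverse).foldl
              gfB_step2 sB).getD j2 (0:Int)) t = true
        · rw [if_pos hcond, ibit_bxor, (hUT' j2 (by omega)).1,
            (hUT' j2 (by omega)).2 t (by omega) htlt]
          rfl
        · rw [if_neg hcond]
          exact (hUT' j2 (by omega)).1
      · intro k hk1 hk2
        rw [helim.2 k]
        by_cases hcond : k ∈ List.range t ∧ k ≠ t ∧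
            ibit ((((List.range' (t+1) (m.length - (t+1))).reverse).foldl
              gfB_step2 sB).getD k (0:Int)) t = true
        · rw [if_pos hcond, ibit_bxor, (hUT' j2 (by omega)).2 k hk1 hk2,
            (hUT' j2 (by omega)).2 t (by omega) htlt]
          rfl
        · rw [if_neg hcond]
          exact (hUT' j2 (by omega)).2 k hk1 hk2

theorem main_equiv (m : List Int) : gfmat_inv m = gfmat_inv_alt m := by
  rw [gfmat_inv_eq, gfmat_inv_alt_eq]
  rcases A_loop m m.length le_rfl with ⟨sA, hA, hreachA, hlowA⟩ | ⟨hAf, hdet0⟩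
  · obtain ⟨hlenA, CA, hdetA, hrowA⟩ := hreachA
    have hCA : CA * Mlow m = 1 := lowinv_mul_eq_one hlenA CA hrowA hlowA
    have hdetM : (Mlow m).det ≠ 0 := by
      intro hc
      have h1 := congrArg Matrix.det hCA
      rw [Matrix.det_mul, Matrix.det_one, hc, mul_zero] at h1
      exact zero_ne_one h1
    rcases B1_loop m m.length le_rfl with ⟨sB, hB, hreachB, hUTB⟩ | ⟨hBf, hdet0'⟩
    · obtain ⟨hR2, hid2, _⟩ := B2_loop m sB hreachB hUTB m.length 0 (by omega) (by omega)
      obtain ⟨hlen2, CB, hdetB, hrowB⟩ := hR2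
      have hCB : CB * Mlow m = 1 :=
        lowinv_mul_eq_one hlen2 CB hrowB (fun k hk j hj => hid2 j (by omega) hj k hk)
      have hMC : Mlow m * CA = 1 := mul_eq_one_comm.mp hCA
      have hCBA : CB = CA := by
        calc CB = CB * (Mlow m * CA) := by rw [hMC, mul_one]
        _ = (CB * Mlow m) * CA := (Matrix.mul_assoc CB (Mlow m) CA).symm
        _ = CA := by rw [hCB, one_mul]
      have hseq : sA = ((List.range' 0 (m.length - 0)).reverse).foldl gfB_step2 sB := by
        apply List.ext_getElem (by rw [hlenA, hlen2])
        intro i h1 h2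
        have hi : i < m.length := by rw [← hlenA]; exact h1
        calc sA[i] = sA.getD i (0:Int) := (List.getD_eq_getElem sA (0:Int) h1).symm
        _ = rowOf m (CA ⟨i, hi⟩) := hrowA ⟨i, hi⟩
        _ = rowOf m (CB ⟨i, hi⟩) := by rw [hCBA]
        _ = (((List.range' 0 (m.length - 0)).reverse).foldl gfB_step2 sB).getD i (0:Int) :=
          (hrowB ⟨i, hi⟩).symm
        _ = (((List.range' 0 (m.length - 0)).reverse).foldl gfB_step2 sB)[i] :=
          List.getD_eq_getElem _ (0:Int) h2
      rw [hA, hB]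
      show some (sA.map (fun (x:Int) => x >>> m.length))
        = some (((List.range m.length).reverse.foldl gfB_step2 sB).map (fun (r:Int) => r >>> m.length))
      have hconv : (List.range m.length).reverse.foldl gfB_step2 sB
          = ((List.range' 0 (m.length - 0)).reverse).foldl gfB_step2 sB := by
        rw [Nat.sub_zero, ← List.range_eq_range']
      rw [hconv, ← hseq]
    · exact absurd hdet0' hdetM
  · rcases B1_loop m m.length le_rfl with ⟨sB, hB, hreachB, hUTB⟩ | ⟨hBf, hdet0'⟩
    · exfalso
      obtain ⟨hR2, hid2, _⟩ := B2_loop m sB hreachB hUTB m.length 0 (by omega) (by omega)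
      obtain ⟨hlen2, CB, hdetB, hrowB⟩ := hR2
      have hCB : CB * Mlow m = 1 :=
        lowinv_mul_eq_one hlen2 CB hrowB (fun k hk j hj => hid2 j (by omega) hj k hk)
      have h1 := congrArg Matrix.det hCB
      rw [Matrix.det_mul, Matrix.det_one, hdet0, mul_zero] at h1
      exact zero_ne_one h1
    · rw [hAf, hBf]
      rfl


-- ===== VERDICT (by name: the statement is the Claim_ definition above) =====
theorem gfmat_inv_spec : Claim_equal_gfmat_inv := by
  intro m _
  unfold Spec_gfmat_inv
  exact main_equiv m
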